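-- pv_equiv track=rewrite | github.com/akdel/OptiScan | OptiScan/folder_searcher.py | find_given_index
-- ===== SOURCE A (Python) =====
-- def find_given_index(path, init_string):
--     path = path.split("/")
--     for i in list(range(len(path)))[::-1]:
--         if path[i].startswith(init_string):
--             return i
--         else:
--             continue
--     raise IndexError(f"{init_string} is missing from the path")
-- ===== SOURCE B (Python) =====
-- def find_given_index(path, init_string):
--     parts = path.split("/")
--     matches = [i for i, part in enumerate(parts) if part.startswith(init_string)]
--     if not matches:
--         raise IndexError(f"{init_string} is missing from the path")
--     return matches[-1]
-- ===== Notes on version B (the rewrite author's own statement) =====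
-- stated objective: alternative
-- what changed: Replaces A's reverse index loop with early return by a forward enumerate comprehension collecting all matching indices and returning the last one (same IndexError when none match).
import Mathlib
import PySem

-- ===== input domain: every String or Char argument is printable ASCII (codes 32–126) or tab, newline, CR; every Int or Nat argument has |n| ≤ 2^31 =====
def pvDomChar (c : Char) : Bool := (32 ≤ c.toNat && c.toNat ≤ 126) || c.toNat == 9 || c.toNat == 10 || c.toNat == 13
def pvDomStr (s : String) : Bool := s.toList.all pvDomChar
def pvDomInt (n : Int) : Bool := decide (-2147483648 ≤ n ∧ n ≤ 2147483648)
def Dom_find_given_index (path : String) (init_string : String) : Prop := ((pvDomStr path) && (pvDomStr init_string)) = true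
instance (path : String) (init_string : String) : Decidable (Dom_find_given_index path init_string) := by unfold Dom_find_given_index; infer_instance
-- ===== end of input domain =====

-- B replaces A's reverse index loop + early return by a forward enumerate/filter collect-then-take-last; same cost (objective: alternative).


-- ===== PORT A =====
-- the 'for i in list(range(len(path)))[::-1]: if path[i].startswith(init_string): return i' loop
def pvLoopA (parts : List String) (s : String) : List Int → Option Int
  | [] => none
  | i :: rest =>
    if PySem.Str.startswith (PySem.List.pyGetD parts i "") s then some i
    else pvLoopA parts s rest

-- the final 'raise IndexError' is the 'none' case, excluded by Pre_; .getD 0 is an arbitrary total default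
def find_given_index (path : String) (init_string : String) : Int :=
  let parts := (PySem.Str.split? path "/").getD []
  (pvLoopA parts init_string
    ((PySem.List.slice? (PySem.List.pyRange 0 (parts.length : Int) 1) none none (-1)).getD [])).getD 0

-- ===== PORT B =====
-- pvMatches = [i for i, part in enumerate(parts) if part.startswith(init_string)]; return pvMatches[-1]
-- (empty pvMatches = the raise, excluded by Pre_; .getD 0 is an arbitrary total default)
def find_given_index_alt (path : String) (init_string : String) : Int :=
  let parts := (PySem.Str.split? path "/").getD []
  let pvMatches := ((PySem.List.enumerate parts).filter
      (fun p => PySem.Str.startswith p.2 init_string)).map (·.1)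
  (PySem.List.pyGet? pvMatches (-1)).getD 0

-- ===== PRECONDITION & SPEC =====
-- A raises IndexError exactly when no "/"-component of path starts with init_string; those inputs are excluded.
def Pre_find_given_index (path : String) (init_string : String) : Prop :=
  ((PySem.Str.split? path "/").getD []).any (fun part => PySem.Str.startswith part init_string) = true
instance (path : String) (init_string : String) : Decidable (Pre_find_given_index path init_string) := by
  unfold Pre_find_given_index; infer_instance

def pvWitness_find_given_index : String × String := ("a/bc/d", "b")

def Spec_find_given_index (path : String) (init_string : String) (out : Int) : Prop := out = find_given_index_alt path init_string
instance (path : String) (init_string : String) (out : Int) : Decidable (Spec_find_given_index path init_string out) := by unfold Spec_find_given_index; infer_instance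

-- ===== CLAIM (what is proved, stated in full; the proofs are below) =====
def Claim_equal_find_given_index : Prop := ∀ (path : String) (init_string : String), Dom_find_given_index path init_string → Pre_find_given_index path init_string → Spec_find_given_index path init_string (find_given_index path init_string)

-- ===== LEMMAS AND PROOFS =====

-- the reverse-scan-first-match loop is head? of the filtered list
theorem pvLoopA_eq_head_filter (parts : List String) (s : String) (m : List Int) :
    pvLoopA parts s m
      = (m.filter (fun i => PySem.Str.startswith (PySem.List.pyGetD parts i "") s)).head? := by
  induction m with
  | nil => rfl
  | cons a t ih =>
    simp only [pvLoopA, List.filter_cons]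
    split <;> simp [ih]

-- B's pvMatches list is the filtered index range
theorem pvMatches_eq (parts : List String) (s : String) :
    ((PySem.List.enumerate parts).filter (fun p => PySem.Str.startswith p.2 s)).map (·.1)
      = (PySem.List.pyRange 0 (parts.length : Int) 1).filter
          (fun i => PySem.Str.startswith (PySem.List.pyGetD parts i "") s) := by
  rw [show PySem.List.enumerate parts = PySem.List.enumerate parts 0 from rfl,
      PySem.List.enumerate_eq_map_pyRange parts ""]
  rw [List.filter_map, List.map_map]
  simp [Function.comp_def, PySem.List.len_eq]

-- both bodies, over an arbitrary parts list
theorem pvCore (parts : List String) (s : String) :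
    (pvLoopA parts s
        ((PySem.List.slice? (PySem.List.pyRange 0 (parts.length : Int) 1) none none (-1)).getD [])).getD 0
      = (PySem.List.pyGet?
          (((PySem.List.enumerate parts).filter (fun p => PySem.Str.startswith p.2 s)).map (·.1))
          (-1)).getD 0 := by
  rw [PySem.List.slice?_none_none_neg_one]
  rw [pvLoopA_eq_head_filter, pvMatches_eq, PySem.List.pyGet?_neg_one]
  rw [Option.getD, List.filter_reverse, List.head?_reverse]

theorem find_given_index_eq_alt (path init_string : String) :
    find_given_index path init_string = find_given_index_alt path init_string :=
  pvCore ((PySem.Str.split? path "/").getD []) init_string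

-- ===== VERDICT (by name: the statement is the Claim_ definition above) =====
theorem find_given_index_spec : Claim_equal_find_given_index := by
  intro path init_string _ _
  unfold Spec_find_given_index
  exact find_given_index_eq_alt path init_string
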